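-- pv_equiv track=rewrite | github.com/EbubekirUstalar/Coding-Challanges | Vowel Families/Solutions.py | same_vowel_group
-- ===== SOURCE A (Python) =====
-- def same_vowel_group(w):
-- 	vowels = 'aeiou'
-- 	v = set([i for i in w[0] if i in vowels])
-- 	to_delete = []
-- 	for i in range(1,len(w)):
-- 		for letter in w[i]:
-- 			if letter in vowels and letter not in v:
-- 				to_delete.append(i)
-- 				break
-- 	while len(to_delete) > 0:
-- 		del w[to_delete[-1]]
-- 		del to_delete[-1]
-- 	return w
-- ===== SOURCE B (Python) =====
-- def same_vowel_group(w):
-- 	vowels = 'aeiou'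
-- 	v = set(c for c in w[0] if c in vowels)
-- 	w[:] = [word for word in w if all(c not in vowels or c in v for c in word)]
-- 	return w
-- ===== Notes on version B (the rewrite author's own statement) =====
-- stated objective: simpler
-- what changed: Replaces the mark-indices-then-delete-from-the-end two-phase loop with a single list-comprehension filter assigned back in place (w[0] qualifies automatically since its vowels define v, so no special case is needed).
import Mathlib
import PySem

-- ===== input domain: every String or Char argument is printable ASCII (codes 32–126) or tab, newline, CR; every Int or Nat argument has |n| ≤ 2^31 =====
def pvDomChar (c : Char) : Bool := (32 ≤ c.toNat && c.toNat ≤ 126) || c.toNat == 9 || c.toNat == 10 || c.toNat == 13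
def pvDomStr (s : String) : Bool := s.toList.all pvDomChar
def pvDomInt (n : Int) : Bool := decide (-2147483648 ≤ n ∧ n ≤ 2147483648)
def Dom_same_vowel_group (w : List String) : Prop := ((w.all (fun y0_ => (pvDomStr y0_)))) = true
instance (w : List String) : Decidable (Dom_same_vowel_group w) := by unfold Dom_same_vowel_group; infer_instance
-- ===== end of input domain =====

-- B replaces A's mark-then-delete-from-the-end two-phase loop by a single in-place filter
-- (objective: simpler). Both Pythons mutate the argument list to the same final contents
-- (A via del, B via slice assignment); the theorems are about the returned value.

-- ===== PORT A =====

def pvVowels : List Char := ['a', 'e', 'i', 'o', 'u']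

-- inner 'for letter in w[i]: if …: append; break' — true iff some letter triggers the break
def pvFindBad (v : PySem.Set Char) : List Char → Bool
  | [] => false
  | c :: cs => if pvVowels.contains c && !(PySem.Set.contains v c) then true else pvFindBad v cs

-- 'while len(to_delete) > 0: del w[to_delete[-1]]; del to_delete[-1]'
def pvDelLoop : List String → List Nat → List String
  | u, [] => u
  | u, i :: td => pvDelLoop (u.eraseIdx ((i :: td).getLast!)) ((i :: td).dropLast)
termination_by _ td => td.length
decreasing_by simp [List.length_dropLast]

def same_vowel_group (w : List String) : List String :=
  match w with
  | [] => []    -- Python raises IndexError at w[0]; excluded by Pre_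
  | h :: t =>
    let v : PySem.Set Char := PySem.Set.ofList (h.toList.filter (fun c => pvVowels.contains c))
    -- for i in range(1, len(w)): indices 1 .. len(w)-1, each in range
    let td := (List.range' 1 t.length).foldl
      (fun acc i => if pvFindBad v (((h :: t).getD i "").toList) then acc ++ [i] else acc) []
    pvDelLoop (h :: t) td

-- ===== PORT B =====

def same_vowel_group_alt (w : List String) : List String :=
  match w with
  | [] => []    -- Python raises IndexError at w[0]; excluded by Pre_
  | h :: t =>
    let v : PySem.Set Char := PySem.Set.ofList (h.toList.filter (fun c => pvVowels.contains c))
    (h :: t).filter (fun s => s.toList.all (fun c => !pvVowels.contains c || PySem.Set.contains v c))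

-- ===== PRECONDITION & SPEC =====
-- Pre_ excludes only the empty list, on which both Pythons raise IndexError at w[0].
def Pre_same_vowel_group (w : List String) : Prop := w ≠ []
instance (w : List String) : Decidable (Pre_same_vowel_group w) := by unfold Pre_same_vowel_group; infer_instance
def pvWitness_same_vowel_group : List String := ["bag", "cat", "ben"]

def Spec_same_vowel_group (w : List String) (out : List String) : Prop := out = same_vowel_group_alt w
instance (w : List String) (out : List String) : Decidable (Spec_same_vowel_group w out) := by unfold Spec_same_vowel_group; infer_instance

-- ===== CLAIM (what is proved, stated in full; the proofs are below) =====
def Claim_equal_same_vowel_group : Prop := ∀ (w : List String), Dom_same_vowel_group w → Pre_same_vowel_group w → Spec_same_vowel_group w (same_vowel_group w)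

-- ===== LEMMAS AND PROOFS =====

-- the append-if fold builds the filtered list
theorem pv_fold_filter (p : Nat → Bool) (l : List Nat) (acc : List Nat) :
    l.foldl (fun a i => if p i then a ++ [i] else a) acc = acc ++ l.filter p := by
  induction l generalizing acc with
  | nil => simp
  | cons x xs ih =>
    simp only [List.foldl_cons, List.filter_cons]
    by_cases h : p x <;> simp [h, ih]

-- the inner break-loop is an 'any'
theorem pvFindBad_eq_any (v : PySem.Set Char) (cs : List Char) :
    pvFindBad v cs = cs.any (fun c => pvVowels.contains c && !(PySem.Set.contains v c)) := by
  induction cs with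
  | nil => rfl
  | cons c cs ih =>
    simp only [pvFindBad, List.any_cons]
    by_cases h : (pvVowels.contains c && !(PySem.Set.contains v c)) = true <;> simp [h, ih]

-- the while-loop is a right fold of eraseIdx
theorem pvDelLoop_eq_foldr (td : List Nat) (u : List String) :
    pvDelLoop u td = td.foldr (fun i acc => acc.eraseIdx i) u := by
  induction td using List.reverseRecOn generalizing u with
  | nil => simp [pvDelLoop]
  | append_singleton td i ih =>
    match htd : td ++ [i], List.append_ne_nil_of_right_ne_nil td (by simp : [i] ≠ []) with
    | j :: td', _ =>
      rw [← htd, pvDelLoop.eq_def]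
      simp only [htd]
      rw [← htd]
      simp only [List.getLast!_eq_getLast?_getD, List.getLast?_append, List.getLast?_singleton,
        Option.some_or, Option.getD_some, List.dropLast_concat,
        List.foldr_append, List.foldr_cons, List.foldr_nil]
      exact ih _

-- bad-index list, built structurally
def pvIdxs (bad : String → Bool) : List String → Nat → List Nat
  | [], _ => []
  | x :: t, k => if bad x then k :: pvIdxs bad t (k + 1) else pvIdxs bad t (k + 1)

theorem pv_filter_range'_eq_idxs (bad : String → Bool) (t : List String) (k : Nat) :
    (List.range' k t.length).filter (fun i => bad (t.getD (i - k) "")) = pvIdxs bad t k := by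
  induction t generalizing k with
  | nil => simp [pvIdxs]
  | cons x t ih =>
    simp only [List.length_cons, List.range'_succ, List.filter_cons, Nat.sub_self,
      List.getD_cons_zero, pvIdxs]
    have hcongr : (List.range' (k+1) t.length).filter (fun i => bad ((x :: t).getD (i - k) ""))
        = (List.range' (k+1) t.length).filter (fun i => bad (t.getD (i - (k+1)) "")) := by
      apply List.filter_congr
      intro i hi
      have hk : k + 1 ≤ i := (List.mem_range'_1.mp hi).1
      have : i - k = (i - (k + 1)) + 1 := by omega
      simp [this]
    by_cases h : bad x
    · rw [if_pos h, hcongr, ih]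
      simp [pvIdxs, h]
    · rw [if_neg h, hcongr, ih]
      simp [pvIdxs, h]

theorem pv_eraseIdx_append (pre l : List String) (x : String) :
    (pre ++ x :: l).eraseIdx pre.length = pre ++ l := by
  induction pre with
  | nil => simp
  | cons p ps ih => simp [ih]

theorem pv_foldr_erase_idxs (bad : String → Bool) (t pre : List String) :
    (pvIdxs bad t pre.length).foldr (fun i acc => acc.eraseIdx i) (pre ++ t)
      = pre ++ t.filter (fun s => !bad s) := by
  induction t generalizing pre with
  | nil => simp [pvIdxs]
  | cons x t ih =>
    have ih' := ih (pre ++ [x])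
    simp only [List.length_append, List.length_cons, List.length_nil, List.append_assoc,
      List.cons_append, List.nil_append] at ih'
    by_cases h : bad x
    · simp only [pvIdxs, if_pos, List.foldr_cons, List.filter_cons, h, Bool.not_true]
      rw [ih', pv_eraseIdx_append]
      simp
    · simp only [pvIdxs, h, if_neg, Bool.not_eq_true, List.filter_cons]
      rw [ih']
      simp

-- every vowel of the head is in v, so B's filter keeps the head
theorem pv_head_kept (h : String) :
    (h.toList.all (fun c => !pvVowels.contains c
      || PySem.Set.contains (PySem.Set.ofList (h.toList.filter (fun c => pvVowels.contains c))) c)) = true := by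
  rw [List.all_eq_true]
  intro c hc
  simp only [PySem.Set.contains_eq_listContains, List.contains_eq_mem, PySem.Set.mem_ofList,
    List.mem_filter, Bool.or_eq_true, Bool.not_eq_true', decide_eq_true_eq, decide_eq_false_iff_not]
  by_cases hv : c ∈ pvVowels
  · exact Or.inr ⟨hc, hv⟩
  · exact Or.inl hv

-- keep = not bad
theorem pv_keep_eq_not_bad (v : PySem.Set Char) (s : String) :
    (s.toList.all (fun c => !pvVowels.contains c || PySem.Set.contains v c))
      = !(s.toList.any (fun c => pvVowels.contains c && !(PySem.Set.contains v c))) := by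
  induction s.toList with
  | nil => rfl
  | cons c cs ih => simp only [List.all_cons, List.any_cons, Bool.not_or, ih, Bool.not_and,
      Bool.not_not]

-- ===== VERDICT (by name: the statement is the Claim_ definition above) =====
theorem same_vowel_group_spec : Claim_equal_same_vowel_group := by
  intro w _ hpre
  unfold Spec_same_vowel_group
  match w with
  | [] => exact absurd rfl hpre
  | h :: t =>
    simp only [same_vowel_group, same_vowel_group_alt]
    set v : PySem.Set Char := PySem.Set.ofList (h.toList.filter (fun c => pvVowels.contains c)) with hv
    set bad : String → Bool := fun s => s.toList.any (fun c => pvVowels.contains c && !(PySem.Set.contains v c)) with hbad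
    -- A's side
    have htd : (List.range' 1 t.length).foldl
        (fun acc i => if pvFindBad v (((h :: t).getD i "").toList) then acc ++ [i] else acc) []
        = pvIdxs bad t 1 := by
      rw [pv_fold_filter]
      rw [show (fun i => pvFindBad v (((h :: t).getD i "").toList)) = fun i => bad ((h :: t).getD i "") by
        funext i; rw [pvFindBad_eq_any]]
      rw [List.nil_append, ← pv_filter_range'_eq_idxs bad t 1]
      apply List.filter_congr
      intro i hi
      have h1 : 1 ≤ i := (List.mem_range'_1.mp hi).1
      have : ∃ j, i = j + 1 := ⟨i - 1, by omega⟩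
      obtain ⟨j, rfl⟩ := this
      simp
    rw [htd, pvDelLoop_eq_foldr]
    have := pv_foldr_erase_idxs bad t [h]
    simp only [List.length_cons, List.length_nil, List.cons_append, List.nil_append] at this
    rw [this]
    -- B's side
    simp only [List.filter_cons]
    rw [if_pos (show (h.toList.all (fun c => !pvVowels.contains c || PySem.Set.contains v c)) = true by
      rw [hv]; exact pv_head_kept h)]
    congr 1
    apply List.filter_congr
    intro s _
    rw [pv_keep_eq_not_bad]
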